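-- pv_equiv track=rewrite | github.com/hdbrinkmann/S4U_JitBit_Tickets | scripts/dedupe_tickets.py | pick_representative
-- ===== SOURCE A (Python) =====
-- from typing import Any, Dict, Iterable, List, Optional, Tuple
--
-- def pick_representative(indices: List[int], tickets: List[Dict[str, Any]]) -> int:
--     # Most informative: longest solution text; fallback to longest problem; then subject length
--     best = indices[0]
--     best_len = len((tickets[best].get("solution") or ""))
--
--     for idx in indices[1:]:
--         s = tickets[idx].get("solution") or ""
--         if len(s) > best_len:
--             best = idx
--             best_len = len(s)
--
--     if best_len > 0:
--         return best
--
--     # fallback to problem length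
--     best2 = indices[0]
--     best_len2 = len((tickets[best2].get("problem") or ""))
--     for idx in indices[1:]:
--         p = tickets[idx].get("problem") or ""
--         if len(p) > best_len2:
--             best2 = idx
--             best_len2 = len(p)
--     if best_len2 > 0:
--         return best2
--
--     # fallback subject length
--     best3 = max(indices, key=lambda k: len((tickets[k].get("subject") or "")))
--     return best3
-- ===== SOURCE B (Python) =====
-- from typing import Any, Dict, List
--
--
-- def pick_representative(indices: List[int], tickets: List[Dict[str, Any]]) -> int:
--     # One pass over indices maintaining (best, length) pairs for all three fields.
--     def flen(idx: int, key: str) -> int: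
--         return len(tickets[idx].get(key) or "")
--
--     i0 = indices[0]
--     bs, ls = i0, flen(i0, "solution")
--     bp, lp = i0, flen(i0, "problem")
--     bj, lj = i0, flen(i0, "subject")
--     for idx in indices[1:]:
--         s = flen(idx, "solution")
--         if s > ls:
--             bs, ls = idx, s
--         p = flen(idx, "problem")
--         if p > lp:
--             bp, lp = idx, p
--         j = flen(idx, "subject")
--         if j > lj:
--             bj, lj = idx, j
--     if ls > 0:
--         return bs
--     if lp > 0:
--         return bp
--     return bj
-- ===== Notes on version B (the rewrite author's own statement) =====
-- stated objective: alternative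
-- what changed: A makes up to three sequential guarded scans (solution scan, problem scan, max(..., key=subject)); B is a single fused pass maintaining three (best index, best length) pairs and applies the priority once at the end.
import Mathlib
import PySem

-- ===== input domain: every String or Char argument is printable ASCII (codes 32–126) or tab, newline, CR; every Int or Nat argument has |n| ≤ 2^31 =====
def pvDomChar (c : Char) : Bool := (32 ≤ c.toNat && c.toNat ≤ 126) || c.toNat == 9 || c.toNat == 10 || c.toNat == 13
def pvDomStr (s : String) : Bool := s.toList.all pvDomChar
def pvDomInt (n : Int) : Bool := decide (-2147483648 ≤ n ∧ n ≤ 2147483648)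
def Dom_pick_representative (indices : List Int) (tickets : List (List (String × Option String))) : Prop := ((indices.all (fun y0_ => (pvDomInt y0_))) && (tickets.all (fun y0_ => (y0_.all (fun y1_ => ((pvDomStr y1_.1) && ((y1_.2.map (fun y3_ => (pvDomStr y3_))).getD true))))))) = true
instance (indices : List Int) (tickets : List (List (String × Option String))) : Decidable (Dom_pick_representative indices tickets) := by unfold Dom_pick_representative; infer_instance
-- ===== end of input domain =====

-- B fuses A's three sequential guarded scans into a single pass keeping three (best, length) pairs; same cost, different decomposition.


-- ===== PORT A =====
-- shared helper: len(tickets[idx].get(field) or "") — in Python, `.get` gives None when the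
-- key is missing or stored as None, and `or ""` turns None/"" into ""
def fieldLen (tickets : List (List (String × Option String))) (idx : Int) (field : String) : Int :=
  let t := PySem.List.pyGetD tickets idx []
  match (PySem.Dict.mk t).get? field with
  | some (some s) => PySem.Str.len s
  | _ => 0

def pick_representative (indices : List Int) (tickets : List (List (String × Option String))) : Int :=
  let b0 : Int := PySem.List.pyGetD indices 0 0
  let st1 := (PySem.List.slice indices (some 1) none).foldl
    (fun (acc : Int × Int) idx =>
      let s := fieldLen tickets idx "solution"
      if s > acc.2 then (idx, s) else acc)
    (b0, fieldLen tickets b0 "solution")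
  if st1.2 > 0 then st1.1
  else
    let st2 := (PySem.List.slice indices (some 1) none).foldl
      (fun (acc : Int × Int) idx =>
        let p := fieldLen tickets idx "problem"
        if p > acc.2 then (idx, p) else acc)
      (b0, fieldLen tickets b0 "problem")
    if st2.2 > 0 then st2.1
    else
      (PySem.List.max? indices (fun k => fieldLen tickets k "subject")).getD 0

-- ===== PORT B =====
def pick_representative_alt (indices : List Int) (tickets : List (List (String × Option String))) : Int :=
  let i0 : Int := PySem.List.pyGetD indices 0 0
  let st := (PySem.List.slice indices (some 1) none).foldl
    (fun (acc : (Int × Int) × (Int × Int) × (Int × Int)) idx =>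
      let acc1 := let s := fieldLen tickets idx "solution"
                  if s > acc.1.2 then (idx, s) else acc.1
      let acc2 := let p := fieldLen tickets idx "problem"
                  if p > acc.2.1.2 then (idx, p) else acc.2.1
      let acc3 := let j := fieldLen tickets idx "subject"
                  if j > acc.2.2.2 then (idx, j) else acc.2.2
      (acc1, acc2, acc3))
    ((i0, fieldLen tickets i0 "solution"),
     (i0, fieldLen tickets i0 "problem"),
     (i0, fieldLen tickets i0 "subject"))
  if st.1.2 > 0 then st.1.1
  else if st.2.1.2 > 0 then st.2.1.1
  else st.2.2.1

-- ===== PRECONDITION & SPEC =====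
-- Pre_ excludes exactly the inputs where Python A raises IndexError: empty indices, or an index outside tickets' range.
def Pre_pick_representative (indices : List Int) (tickets : List (List (String × Option String))) : Prop :=
  indices ≠ [] ∧ ∀ i ∈ indices, PySem.Raise.InRange tickets.length i
instance (indices : List Int) (tickets : List (List (String × Option String))) : Decidable (Pre_pick_representative indices tickets) := by unfold Pre_pick_representative; infer_instance

def pvWitness_pick_representative : List Int × (List (List (String × Option String))) :=
  ([0, 1, -1], [[("solution", some "ab"), ("subject", some "x")], [("solution", none), ("problem", some "long text")]])

def Spec_pick_representative (indices : List Int) (tickets : List (List (String × Option String))) (out : Int) : Prop := out = pick_representative_alt indices tickets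
instance (indices : List Int) (tickets : List (List (String × Option String))) (out : Int) : Decidable (Spec_pick_representative indices tickets out) := by unfold Spec_pick_representative; infer_instance

-- ===== CLAIM (what is proved, stated in full; the proofs are below) =====
def Claim_equal_pick_representative : Prop := ∀ (indices : List Int) (tickets : List (List (String × Option String))), Dom_pick_representative indices tickets → Pre_pick_representative indices tickets → Spec_pick_representative indices tickets (pick_representative indices tickets)

-- ===== LEMMAS AND PROOFS =====

-- B's fused fold computes, componentwise, the three separate folds.
theorem fold3_split (l : List Int) (f g h : Int → Int) (a b c : Int × Int) :
    l.foldl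
      (fun (acc : (Int × Int) × (Int × Int) × (Int × Int)) idx =>
        (if f idx > acc.1.2 then (idx, f idx) else acc.1,
         if g idx > acc.2.1.2 then (idx, g idx) else acc.2.1,
         if h idx > acc.2.2.2 then (idx, h idx) else acc.2.2))
      (a, b, c)
    = (l.foldl (fun acc idx => if f idx > acc.2 then (idx, f idx) else acc) a,
       l.foldl (fun acc idx => if g idx > acc.2 then (idx, g idx) else acc) b,
       l.foldl (fun acc idx => if h idx > acc.2 then (idx, h idx) else acc) c) := by
  induction l generalizing a b c with
  | nil => rfl
  | cons x t ih => simp only [List.foldl_cons]; exact ih _ _ _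

-- Python's max(xs, key=k) (first maximal wins) over m :: rest is the strict-'>' running pair fold.
theorem max?_eq_pair_fold (key : Int → Int) (rest : List Int) (m : Int) :
    PySem.List.max? (m :: rest) key
      = some ((rest.foldl (fun (acc : Int × Int) x => if key x > acc.2 then (x, key x) else acc) (m, key m)).1) := by
  induction rest generalizing m with
  | nil => simp [PySem.List.max?]
  | cons x t ih =>
    have hstep : PySem.List.max? (m :: x :: t) key
        = PySem.List.max? ((if key m < key x then x else m) :: t) key := by
      simp only [PySem.List.max?, List.foldl_cons]
      by_cases hx : key m < key x <;> simp [hx]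
    rw [hstep]
    simp only [List.foldl_cons]
    by_cases hx : key m < key x
    · simpa [hx, gt_iff_lt] using ih x
    · simpa [hx, gt_iff_lt] using ih m

-- ===== VERDICT (by name: the statement is the Claim_ definition above) =====
theorem pick_representative_spec : Claim_equal_pick_representative := by
  intro indices tickets _dom hpre
  obtain ⟨hne, _⟩ := hpre
  obtain ⟨i0, rest, rfl⟩ := List.exists_cons_of_ne_nil hne
  unfold Spec_pick_representative pick_representative pick_representative_alt
  simp only [PySem.List.slice_from_one, List.tail_cons, PySem.List.pyGetD_zero_cons,
    fold3_split, max?_eq_pair_fold, Option.getD_some]
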